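-- pv_equiv track=rewrite | github.com/cod-decod/password-transformer | src/ml/pattern_learner.py | _get_transformation_summary
-- ===== SOURCE A (Python) =====
-- from typing import Dict, List, Tuple, Optional, Any
--
-- def _get_transformation_summary(original: str, transformed: str) -> Dict:
--     """Extract what transformations were applied"""
--     summary = {
--         'length_change': len(transformed) - len(original),
--         'chars_added': len(set(transformed) - set(original)),
--         'chars_removed': len(set(original) - set(transformed)),
--         'case_changes': sum(1 for i, c in enumerate(original) if i < len(transformed) and c != transformed[i] and c.swapcase() == transformed[i]),
--         'substitutions': sum(1 for i, c in enumerate(original) if i < len(transformed) and c != transformed[i] and c.swapcase() != transformed[i])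
--     }
--     return summary
-- ===== SOURCE B (Python) =====
-- def _hamming(x: str, y: str) -> int:
--     """Number of positions (up to the shorter length) where x and y differ."""
--     n = 0
--     for a, b in zip(x, y):
--         if a != b:
--             n += 1
--     return n
--
-- def _get_transformation_summary(original: str, transformed: str) -> dict:
--     """Extract what transformations were applied.
--
--     substitutions = Hamming distance of the case-folded strings (a mismatch that
--     survives lowercasing is a real substitution); case_changes = all mismatches
--     minus those (a mismatch erased by lowercasing is exactly a case flip)."""
--     mismatches = _hamming(original, transformed)
--     substitutions = _hamming(original.lower(), transformed.lower())
--     return {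
--         'length_change': len(transformed) - len(original),
--         'chars_added': len(set(transformed) - set(original)),
--         'chars_removed': len(set(original) - set(transformed)),
--         'case_changes': mismatches - substitutions,
--         'substitutions': substitutions,
--     }
-- ===== Notes on version B (the rewrite author's own statement) =====
-- stated objective: faster
-- what changed: B never tests swapcase per character: it computes substitutions as the Hamming distance of the two lowercased strings (a mismatch surviving lowercasing is a real substitution) and case_changes as the plain Hamming distance minus that, keeping the set-difference entries; dropping the per-index guard/indexing and per-char swapcase gives a measured constant-factor speedup.
import Mathlib
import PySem

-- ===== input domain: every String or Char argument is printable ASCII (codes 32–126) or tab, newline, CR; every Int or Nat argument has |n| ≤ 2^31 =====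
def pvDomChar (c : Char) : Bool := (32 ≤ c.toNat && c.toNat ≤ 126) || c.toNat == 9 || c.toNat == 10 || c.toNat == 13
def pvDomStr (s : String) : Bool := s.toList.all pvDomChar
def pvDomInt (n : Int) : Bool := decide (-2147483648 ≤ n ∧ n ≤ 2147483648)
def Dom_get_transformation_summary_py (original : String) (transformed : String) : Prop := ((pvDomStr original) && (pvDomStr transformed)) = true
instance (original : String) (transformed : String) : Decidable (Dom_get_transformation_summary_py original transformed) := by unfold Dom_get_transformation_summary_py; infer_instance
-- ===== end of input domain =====

-- B drops the per-character swapcase test: substitutions = Hamming distance of the lowercased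
-- strings, case_changes = total mismatches minus that (measured constant-factor speedup).

-- c.swapcase() for a single char; exact on the ASCII domain
def swapcaseChar (c : Char) : Char :=
  if PySem.Chars.isupper c then PySem.Chars.lowerChar c
  else if PySem.Chars.islower c then PySem.Chars.upperChar c
  else c

-- ===== PORT A =====
def get_transformation_summary_py (original : String) (transformed : String) : List (String × Int) :=
  let o := original.toList
  let t := transformed.toList
  [ ("length_change", (t.length : Int) - (o.length : Int)),
    ("chars_added", ((PySem.Set.diff (PySem.Set.ofList t) (PySem.Set.ofList o)).length : Int)),
    ("chars_removed", ((PySem.Set.diff (PySem.Set.ofList o) (PySem.Set.ofList t)).length : Int)),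
    ("case_changes",
      (((PySem.List.enumerate o).filter (fun p =>
          decide (p.1 < (t.length : Int)) && (p.2 != PySem.List.pyGetD t p.1 ' ')
            && (swapcaseChar p.2 == PySem.List.pyGetD t p.1 ' '))).length : Int)),
    ("substitutions",
      (((PySem.List.enumerate o).filter (fun p =>
          decide (p.1 < (t.length : Int)) && (p.2 != PySem.List.pyGetD t p.1 ' ')
            && !(swapcaseChar p.2 == PySem.List.pyGetD t p.1 ' '))).length : Int)) ]

-- ===== PORT B =====
-- _hamming: counting loop over zip
def hammingL (x : List Char) (y : List Char) : Int :=
  (x.zip y).foldl (fun n ab => if ab.1 ≠ ab.2 then n + 1 else n) 0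

def get_transformation_summary_py_alt (original : String) (transformed : String) : List (String × Int) :=
  let mismatches := hammingL original.toList transformed.toList
  let substitutions := hammingL (PySem.Str.lower original).toList (PySem.Str.lower transformed).toList
  [ ("length_change", (transformed.toList.length : Int) - (original.toList.length : Int)),
    ("chars_added", ((PySem.Set.diff (PySem.Set.ofList transformed.toList) (PySem.Set.ofList original.toList)).length : Int)),
    ("chars_removed", ((PySem.Set.diff (PySem.Set.ofList original.toList) (PySem.Set.ofList transformed.toList)).length : Int)),
    ("case_changes", mismatches - substitutions),
    ("substitutions", substitutions) ]

-- ===== PRECONDITION & SPEC =====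
def Spec_get_transformation_summary_py (original : String) (transformed : String) (out : List (String × Int)) : Prop := out = get_transformation_summary_py_alt original transformed
instance (original : String) (transformed : String) (out : List (String × Int)) : Decidable (Spec_get_transformation_summary_py original transformed out) := by unfold Spec_get_transformation_summary_py; infer_instance

-- ===== CLAIM =====
def Claim_equal_get_transformation_summary_py : Prop := ∀ (original : String) (transformed : String), Dom_get_transformation_summary_py original transformed → Spec_get_transformation_summary_py original transformed (get_transformation_summary_py original transformed)

-- ===== LEMMAS AND PROOFS =====

theorem char_eq_iff_toNat {c d : Char} : c = d ↔ c.toNat = d.toNat :=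
  ⟨fun h => h ▸ rfl, fun h => Char.ext (UInt32.toNat_inj.mp h)⟩

theorem char_ofNat_toNat {n : Nat} (h : n < 55296) : (Char.ofNat n).toNat = n := by
  simp [Char.ofNat, Char.toNat, Nat.isValidChar, h, Char.ofNatAux]

theorem isupper_iff (c : Char) : PySem.Chars.isupper c = true ↔ 65 ≤ c.toNat ∧ c.toNat ≤ 90 := by
  simp only [PySem.Chars.isupper, Bool.and_eq_true, decide_eq_true_eq, Char.le_def,
    UInt32.le_iff_toNat_le]
  exact Iff.rfl

theorem islower_iff (c : Char) : PySem.Chars.islower c = true ↔ 97 ≤ c.toNat ∧ c.toNat ≤ 122 := by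
  simp only [PySem.Chars.islower, Bool.and_eq_true, decide_eq_true_eq, Char.le_def,
    UInt32.le_iff_toNat_le]
  exact Iff.rfl

-- a lowercasing-erased mismatch is exactly a case flip: the substitution tests agree per char
theorem lower_ne_eq_subst (c t : Char) :
    (PySem.Chars.lowerChar c != PySem.Chars.lowerChar t)
      = ((c != t) && !(swapcaseChar c == t)) := by
  unfold swapcaseChar PySem.Chars.lowerChar PySem.Chars.upperChar
  rw [Bool.eq_iff_iff]
  by_cases hc : PySem.Chars.isupper c = true <;>
  by_cases ht : PySem.Chars.isupper t = true <;>
  by_cases hcl : PySem.Chars.islower c = true <;>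
  by_cases htl : PySem.Chars.islower t = true <;>
    rw [isupper_iff] at hc <;> rw [isupper_iff] at ht <;>
    rw [islower_iff] at hcl <;> rw [islower_iff] at htl <;>
    simp only [isupper_iff, islower_iff, hc, ht, hcl, htl, bne_iff_ne, ne_eq,
      Bool.and_eq_true, Bool.not_eq_true', beq_eq_false_iff_ne, char_eq_iff_toNat,
      not_and, not_not, if_true, if_false, ite_true, ite_false, iff_true, iff_false,
      not_true, not_false_iff, and_self, true_and, and_true, false_and, and_false] <;>
    first
    | omega
    | (rw [char_ofNat_toNat (by omega)]; omega)
    | (rw [char_ofNat_toNat (by omega), char_ofNat_toNat (by omega)]; omega)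

-- mismatches split exactly into case changes and substitutions
theorem countP_ne_split (l : List (Char × Char)) :
    l.countP (fun q => q.1 != q.2)
      = l.countP (fun q => (q.1 != q.2) && (swapcaseChar q.1 == q.2))
        + l.countP (fun q => (q.1 != q.2) && !(swapcaseChar q.1 == q.2)) := by
  induction l with
  | nil => simp
  | cons p l ih =>
    simp only [List.countP_cons, ih]
    by_cases h1 : (p.1 != p.2) = true
    · by_cases h2 : (swapcaseChar p.1 == p.2) = true <;> simp [h1, h2] <;> omega
    · simp [h1]

-- B's counting loop is a countP
theorem hammingL_eq_countP (x y : List Char) :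
    hammingL x y = ((x.zip y).countP (fun q => q.1 != q.2) : Int) := by
  unfold hammingL
  generalize x.zip y = l
  suffices h : ∀ (l : List (Char × Char)) (a : Int),
      l.foldl (fun n ab => if ab.1 ≠ ab.2 then n + 1 else n) a
        = a + (l.countP (fun q => q.1 != q.2) : Int) by
    simpa using h l 0
  intro l
  induction l with
  | nil => intro a; simp
  | cons p l ih =>
    intro a
    rw [List.foldl_cons, List.countP_cons]
    by_cases h : p.1 = p.2
    · rw [if_neg (not_not_intro h), ih]; simp [h]
    · rw [if_pos h, ih]
      simp only [bne_iff_ne, ne_eq, h, not_false_eq_true, decide_true, if_pos]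
      push_cast; ring

-- A's guarded sum over enumerate never fires once the index bound is exhausted
theorem filter_enumerate_out_of_range (cond : Char → Char → Bool) (t : List Char) :
    ∀ (o : List Char) (s : Int), (t.length : Int) ≤ s →
      ((PySem.List.enumerate o s).filter (fun p =>
          decide (p.1 < (t.length : Int)) && cond p.2 (PySem.List.pyGetD t p.1 ' '))).length = 0 := by
  intro o
  induction o with
  | nil => intro s _; simp [PySem.List.enumerate]
  | cons c o ih =>
    intro s hs
    rw [PySem.List.enumerate_cons]
    have h1 : ¬ (s < (t.length : Int)) := by omega
    simp only [List.filter_cons]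
    rw [if_neg (by simp [h1])]
    exact ih (s + 1) (by omega)

-- prefix-indexed characterisation of A's guarded enumerate sum as a countP over zip
theorem filter_enumerate_eq_countP_zip (cond : Char → Char → Bool) :
    ∀ (o pre rest : List Char),
      ((PySem.List.enumerate o (pre.length : Int)).filter (fun p =>
          decide (p.1 < ((pre ++ rest).length : Int)) && cond p.2 (PySem.List.pyGetD (pre ++ rest) p.1 ' '))).length
      = (o.zip rest).countP (fun q => cond q.1 q.2) := by
  intro o
  induction o with
  | nil => intro pre rest; simp [PySem.List.enumerate]
  | cons c o ih =>
    intro pre rest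
    cases rest with
    | nil =>
      rw [List.zip_nil_right]
      exact filter_enumerate_out_of_range cond (pre ++ []) (c :: o) (pre.length : Int)
        (by simp)
    | cons x rs =>
      rw [PySem.List.enumerate_cons]
      have hget : PySem.List.pyGetD (pre ++ x :: rs) ((pre.length : Nat) : Int) ' ' = x := by
        rw [PySem.List.pyGetD_natCast]
        simp [List.getD_eq_getElem?_getD]
      have hg : ((pre.length : Nat) : Int) < (((pre ++ x :: rs).length : Nat) : Int) := by
        push_cast [List.length_append, List.length_cons]; omega
      have hih := ih (pre ++ [x]) rs
      rw [show (pre ++ [x]) ++ rs = pre ++ x :: rs by simp] at hih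
      rw [show (((pre ++ [x]).length : Nat) : Int) = ((pre.length : Nat) : Int) + 1 by
        push_cast [List.length_append, List.length_cons, List.length_nil]; omega] at hih
      simp only [List.filter_cons, List.zip_cons_cons, List.countP_cons, hget, hg,
        decide_true, Bool.true_and]
      by_cases hc2 : cond c x = true
      · rw [if_pos hc2, List.length_cons, hih, if_pos hc2]
      · rw [if_neg hc2, hih, if_neg hc2, Nat.add_zero]

-- instantiation at pre = [] (definitional: [] ++ t reduces to t)
theorem filter_enumerate_eq_countP_zip0 (cond : Char → Char → Bool) (o t : List Char) :
    ((PySem.List.enumerate o 0).filter (fun p =>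
        decide (p.1 < (t.length : Int)) && cond p.2 (PySem.List.pyGetD t p.1 ' '))).length
      = (o.zip t).countP (fun q => cond q.1 q.2) :=
  filter_enumerate_eq_countP_zip cond o [] t

-- B's lowered-strings Hamming distance counts exactly A's substitution predicate
theorem hammingL_lower_eq (o t : List Char) :
    hammingL (PySem.Chars.lower o) (PySem.Chars.lower t)
      = ((o.zip t).countP (fun q => (q.1 != q.2) && !(swapcaseChar q.1 == q.2)) : Int) := by
  rw [hammingL_eq_countP]
  congr 1
  unfold PySem.Chars.lower
  rw [List.zip_map, List.countP_map]
  apply List.countP_congr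
  intro q _
  obtain ⟨c, t⟩ := q
  simp only [Function.comp_apply, Prod.map_apply]
  rw [lower_ne_eq_subst c t]

-- ===== VERDICT =====
theorem get_transformation_summary_py_spec : Claim_equal_get_transformation_summary_py := by
  intro original transformed _
  unfold Spec_get_transformation_summary_py
  unfold get_transformation_summary_py get_transformation_summary_py_alt
  rw [PySem.Str.toList_lower, PySem.Str.toList_lower, hammingL_lower_eq, hammingL_eq_countP]
  simp only [Bool.and_assoc,
    filter_enumerate_eq_countP_zip0 (fun c tc => (c != tc) && (swapcaseChar c == tc))
      original.toList transformed.toList,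
    filter_enumerate_eq_countP_zip0 (fun c tc => (c != tc) && !(swapcaseChar c == tc))
      original.toList transformed.toList,
    countP_ne_split (original.toList.zip transformed.toList)]
  push_cast
  ring_nf
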